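-- pv_equiv track=rewrite | github.com/pclumson1/Python3_Algorithms | findpairsum.py | findPairsSummingToK
-- ===== SOURCE A (Python) =====
-- def findPairsSummingToK(a, m, k):
--   counter = 0
--   have = {}
--
--   for i, n in enumerate(a):
--     if i > m - 1:
--       if have.get(a[i - m], 0) <= 1:
--         have.pop(a[i - m], None)
--       else:
--         have[a[i - m]] -= 1
--
--     if k - n in have:
--       counter += 1 # may want to track the index
--
--     have[n] = have.get(n, 0) + 1
--
--   return counter
-- ===== SOURCE B (Python) =====
-- def findPairsSummingToK(a, m, k):
--     counter = 0
--     for i in range(len(a)):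
--         lo = i - m + 1
--         if lo < 0:
--             lo = 0
--         for j in range(lo, i):
--             if a[j] == k - a[i]:
--                 counter += 1
--                 break
--     return counter
-- ===== Notes on version B (the rewrite author's own statement) =====
-- stated objective: simpler
-- what changed: Replaces A's incrementally maintained sliding-window frequency dict (evict/decrement/insert per step) with a direct backward scan of the preceding window for each index, keeping no auxiliary structure.
-- intended difference: For m = 0 (a window of size zero) A evicts the current value before its membership test, so it counts every i with some earlier j where a[j] = k - a[i] and k != 2*a[i]; B returns the intended 0, since a size-zero window can hold no pair. — e.g. on findPairsSummingToK([1, 2], 0, 3): A returns 1, B returns 0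
import Mathlib
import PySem

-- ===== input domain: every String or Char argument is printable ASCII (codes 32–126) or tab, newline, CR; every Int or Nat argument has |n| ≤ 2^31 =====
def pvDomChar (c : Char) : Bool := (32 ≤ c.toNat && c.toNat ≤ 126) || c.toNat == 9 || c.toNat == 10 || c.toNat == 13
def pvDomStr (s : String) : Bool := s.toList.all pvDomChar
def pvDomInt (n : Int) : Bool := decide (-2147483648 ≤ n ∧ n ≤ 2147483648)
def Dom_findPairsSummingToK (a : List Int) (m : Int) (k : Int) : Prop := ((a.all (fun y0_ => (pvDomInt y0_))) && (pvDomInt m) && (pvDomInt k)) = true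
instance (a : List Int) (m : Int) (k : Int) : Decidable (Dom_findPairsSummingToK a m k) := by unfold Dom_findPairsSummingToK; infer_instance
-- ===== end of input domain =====

-- B replaces A's maintained sliding-window frequency dict by a direct backward scan of the
-- preceding window for each index (objective: simpler — no auxiliary structure).

-- ===== PORT A =====
-- one loop step of A: eviction of a[i-m], membership test, insertion of the current value.
-- a[i - m] is ported as pyGetD _ _ 0: inside Pre_ the index is always in range (Python raises
-- IndexError exactly where it is not, and those inputs are outside Pre_), so this is exact there.
def stepA (a : List Int) (m k : Int) (st : Int × PySem.Dict Int Int) (p : Int × Int) :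
    Int × PySem.Dict Int Int :=
  let hv :=
    if p.1 > m - 1 then
      let x := PySem.List.pyGetD a (p.1 - m) 0
      if st.2.getD x 0 ≤ 1 then st.2.erase x else st.2.modify x 0 (fun t => t - 1)
    else st.2
  let c := if hv.contains (k - p.2) then st.1 + 1 else st.1
  (c, hv.insert p.2 (hv.getD p.2 0 + 1))

def findPairsSummingToK (a : List Int) (m : Int) (k : Int) : Int :=
  ((PySem.List.enumerate a 0).foldl (stepA a m k) (0, PySem.Dict.empty)).1

-- ===== PORT B =====
-- the inner scan of Source B: does any j in range(lo, i) satisfy a[j] == k - a[i]?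
-- (List.any stops at the first hit, exactly like Source B's break.)
def winHit (a : List Int) (m k i : Int) : Bool :=
  (PySem.List.pyRange (if i - m + 1 < 0 then 0 else i - m + 1) i 1).any
    (fun j => PySem.List.pyGetD a j 0 == k - PySem.List.pyGetD a i 0)

def findPairsSummingToK_alt (a : List Int) (m : Int) (k : Int) : Int :=
  (PySem.List.pyRange 0 (a.length : Int) 1).foldl
    (fun c i => if winHit a m k i then c + 1 else c) 0

-- ===== PRECONDITION & SPEC =====
-- Pre_ excludes m < 0 with a nonempty list, where A raises IndexError (a[i - m] reads past the
-- end of the list); everywhere else A returns normally.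
def Pre_findPairsSummingToK (a : List Int) (m : Int) (k : Int) : Prop := 0 ≤ m ∨ a = []
instance (a : List Int) (m : Int) (k : Int) : Decidable (Pre_findPairsSummingToK a m k) := by
  unfold Pre_findPairsSummingToK; infer_instance
def pvWitness_findPairsSummingToK : List Int × Int × Int := ([1, 2, 3, 1, 2], 3, 3)

-- With m = 0 (a window of size zero) A evicts the CURRENT value before the membership test, so its
-- dict degenerates to "previously seen values minus the current one" and A counts every i with some
-- earlier j where a[j] = k - a[i] and k ≠ 2*a[i]; B returns the intended 0 — a size-zero window
-- holds no pair.
def D_findPairsSummingToK (a : List Int) (m : Int) (k : Int) : Prop :=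
  m = 0 ∧ ∃ i : Fin a.length, ∃ j : Fin a.length,
    (j : Nat) < (i : Nat) ∧ a[(j : Nat)] = k - a[(i : Nat)] ∧ k ≠ 2 * a[(i : Nat)]
instance (a : List Int) (m : Int) (k : Int) : Decidable (D_findPairsSummingToK a m k) := by
  unfold D_findPairsSummingToK; infer_instance

def Spec_findPairsSummingToK (a : List Int) (m : Int) (k : Int) (out : Int) : Prop :=
  ¬ D_findPairsSummingToK a m k → out = findPairsSummingToK_alt a m k
instance (a : List Int) (m : Int) (k : Int) (out : Int) : Decidable (Spec_findPairsSummingToK a m k out) := by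
  unfold Spec_findPairsSummingToK; infer_instance

def pvDiffWitness_findPairsSummingToK : List Int × Int × Int := ([1, 2], 0, 3)
def pvDiffWitnessOut_findPairsSummingToK : Int × Int := (1, 0)

-- ===== CLAIM (what is proved, stated in full; the proofs are below) =====
def Claim_unchanged_findPairsSummingToK : Prop := ∀ (a : List Int) (m : Int) (k : Int), Dom_findPairsSummingToK a m k → Pre_findPairsSummingToK a m k → Spec_findPairsSummingToK a m k (findPairsSummingToK a m k)
def Claim_changed_findPairsSummingToK : Prop := Dom_findPairsSummingToK (pvDiffWitness_findPairsSummingToK.1) (pvDiffWitness_findPairsSummingToK.2.1) (pvDiffWitness_findPairsSummingToK.2.2) ∧ Pre_findPairsSummingToK (pvDiffWitness_findPairsSummingToK.1) (pvDiffWitness_findPairsSummingToK.2.1) (pvDiffWitness_findPairsSummingToK.2.2) ∧ D_findPairsSummingToK (pvDiffWitness_findPairsSummingToK.1) (pvDiffWitness_findPairsSummingToK.2.1) (pvDiffWitness_findPairsSummingToK.2.2) ∧ findPairsSummingToK (pvDiffWitness_findPairsSummingToK.1) (pvDiffWitness_findPairsSummingToK.2.1) (pvDiffWitness_findPairsSummingToK.2.2)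 = pvDiffWitnessOut_findPairsSummingToK.1 ∧ findPairsSummingToK_alt (pvDiffWitness_findPairsSummingToK.1) (pvDiffWitness_findPairsSummingToK.2.1) (pvDiffWitness_findPairsSummingToK.2.2) = pvDiffWitnessOut_findPairsSummingToK.2 ∧ pvDiffWitnessOut_findPairsSummingToK.1 ≠ pvDiffWitnessOut_findPairsSummingToK.2
def Claim_exact_findPairsSummingToK : Prop := ∀ (a : List Int) (m : Int) (k : Int), Dom_findPairsSummingToK a m k → Pre_findPairsSummingToK a m k → D_findPairsSummingToK a m k → findPairsSummingToK a m k ≠ findPairsSummingToK_alt a m k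
-- ===== LEMMAS AND PROOFS =====

-- values seen through positions [lo, hi) of a
def winVals (a : List Int) (lo hi : Int) : List Int :=
  (PySem.List.pyRange lo hi 1).map (fun j => PySem.List.pyGetD a j 0)

-- multiplicity of v among a[lo..hi)
def wc (a : List Int) (lo hi v : Int) : Nat := (winVals a lo hi).count v

-- dict invariant of A's loop (m ≥ 1): before processing index i, the dict holds exactly the
-- counts of the values at positions [max 0 (i-m), i)
def InvA (a : List Int) (m i : Int) (d : PySem.Dict Int Int) : Prop :=
  ∀ v, d.get? v = if wc a (max 0 (i - m)) i v = 0 then none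
                  else some ((wc a (max 0 (i - m)) i v : Int))

-- the per-index condition A's m = 0 loop actually counts
def cond0 (a : List Int) (k : Int) (j : Int) : Bool :=
  decide (k - PySem.List.pyGetD a j 0 ∈ winVals a 0 j ∧
          k - PySem.List.pyGetD a j 0 ≠ PySem.List.pyGetD a j 0)

-- dict invariant of A's loop (m = 0): the dict is the set of values seen so far, each with count 1
def Inv0 (a : List Int) (i : Int) (d : PySem.Dict Int Int) : Prop :=
  ∀ v, d.get? v = if v ∈ winVals a 0 i then some 1 else none

theorem wc_mem (a : List Int) (lo hi v : Int) : v ∈ winVals a lo hi ↔ wc a lo hi v ≠ 0 := by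
  simp [wc, Ne, List.count_eq_zero]

theorem wc_cons (a : List Int) (lo hi v : Int) (h : lo < hi) :
    wc a lo hi v = (if PySem.List.pyGetD a lo 0 = v then 1 else 0) + wc a (lo + 1) hi v := by
  simp only [wc, winVals, PySem.List.pyRange_one_cons h, List.map_cons, List.count_cons]
  rcases eq_or_ne (PySem.List.pyGetD a lo 0) v with he | he <;> simp [he] <;> omega

theorem wc_snoc (a : List Int) (lo hi v : Int) (h : lo ≤ hi) :
    wc a lo (hi + 1) v = wc a lo hi v + (if PySem.List.pyGetD a hi 0 = v then 1 else 0) := by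
  simp only [wc, winVals, PySem.List.pyRange_one_succ_right h, List.map_append, List.count_append,
    List.map_cons, List.map_nil]
  rcases eq_or_ne (PySem.List.pyGetD a hi 0) v with he | he <;> simp [he]

theorem winVals_snoc (a : List Int) (lo hi : Int) (h : lo ≤ hi) :
    winVals a lo (hi + 1) = winVals a lo hi ++ [PySem.List.pyGetD a hi 0] := by
  simp [winVals, PySem.List.pyRange_one_succ_right h]

theorem winVals_nil (a : List Int) (lo hi : Int) (h : hi ≤ lo) : winVals a lo hi = [] := by
  simp [winVals, PySem.List.pyRange_one_eq_nil h]

theorem dict_get?_erase (d : PySem.Dict Int Int) (x v : Int) :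
    (d.erase x).get? v = if v = x then none else d.get? v := by
  rcases d with ⟨items⟩
  simp only [PySem.Dict.erase, PySem.Dict.get?]
  induction items with
  | nil => simp
  | cons p t ih =>
    rcases eq_or_ne p.1 x with hp | hp
    · rw [List.filter_cons_of_neg (by simp [hp])]
      rcases eq_or_ne v x with hv | hv
      · simpa [hv] using ih
      · rw [ih, if_neg hv, if_neg hv, List.find?_cons_of_neg (by simp [hp]; exact fun h => hv h.symm)]
    · rw [List.filter_cons_of_pos (by simp [hp])]
      rcases eq_or_ne p.1 v with hpv | hpv
      · have hvx : v ≠ x := fun h => hp (hpv.trans h)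
        rw [List.find?_cons_of_pos (by simp [hpv]), List.find?_cons_of_pos (by simp [hpv]),
          if_neg hvx]
      · rw [List.find?_cons_of_neg (by simp [hpv]), List.find?_cons_of_neg (by simp [hpv]), ih]

-- post-eviction invariant: the dict holds the counts of positions [max 0 (i-m+1), i)
def InvW (a : List Int) (m i : Int) (d : PySem.Dict Int Int) : Prop :=
  ∀ v, d.get? v = if wc a (max 0 (i - m + 1)) i v = 0 then none
                  else some ((wc a (max 0 (i - m + 1)) i v : Int))

theorem inv_getD (a : List Int) (lo i : Int) (d : PySem.Dict Int Int)
    (h : ∀ v, d.get? v = if wc a lo i v = 0 then none else some ((wc a lo i v : Int))) :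
    ∀ v, d.getD v 0 = (wc a lo i v : Int) := by
  intro v
  rw [PySem.Dict.getD_eq_get?_getD, h v]
  rcases eq_or_ne (wc a lo i v) 0 with hz | hz <;> simp [hz]

theorem evict_step (a : List Int) (m : Int) (hm : 1 ≤ m) (i : Int) (h0 : 0 ≤ i)
    (d : PySem.Dict Int Int) (hinv : InvA a m i d) :
    InvW a m i (if i > m - 1 then
        (let x := PySem.List.pyGetD a (i - m) 0
         if d.getD x 0 ≤ 1 then d.erase x else d.modify x 0 (fun t => t - 1))
      else d) := by
  by_cases hev : i > m - 1
  · rw [if_pos hev]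
    have hmax1 : max 0 (i - m) = i - m := by omega
    have hmax2 : max 0 (i - m + 1) = i - m + 1 := by omega
    set x := PySem.List.pyGetD a (i - m) 0 with hx
    have hgetD := inv_getD a (max 0 (i - m)) i d hinv
    have hcx : wc a (max 0 (i - m)) i x = 1 + wc a (max 0 (i - m + 1)) i x := by
      rw [hmax1, hmax2, wc_cons a (i - m) i x (by omega), if_pos rfl]
    have hcv : ∀ v, v ≠ x → wc a (max 0 (i - m)) i v = wc a (max 0 (i - m + 1)) i v := by
      intro v hv
      rw [hmax1, hmax2, wc_cons a (i - m) i v (by omega), if_neg (fun h => hv h.symm)]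
      omega
    by_cases hle : d.getD x 0 ≤ 1
    · rw [if_pos hle]
      have hx0 : wc a (max 0 (i - m + 1)) i x = 0 := by
        have := hgetD x
        omega
      intro v
      rw [dict_get?_erase]
      rcases eq_or_ne v x with hvx | hvx
      · subst hvx
        simp [hx0]
      · rw [if_neg hvx, hinv v, hcv v hvx]
    · rw [if_neg hle]
      have hx1 : 1 ≤ wc a (max 0 (i - m + 1)) i x := by
        have := hgetD x
        omega
      intro v
      simp only [PySem.Dict.modify]
      rw [PySem.Dict.get?_insert]
      rcases eq_or_ne v x with hvx | hvx
      · subst hvx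
        rw [if_pos rfl, if_neg (by omega)]
        congr 1
        rw [hgetD x, hcx]
        push_cast
        ring
      · rw [if_neg hvx, hinv v, hcv v hvx]
  · rw [if_neg hev]
    intro v
    rw [hinv v]
    have hmaxeq : max 0 (i - m) = max 0 (i - m + 1) := by omega
    rw [hmaxeq]

theorem contains_step (a : List Int) (m k i : Int) (h0 : 0 ≤ i) (d : PySem.Dict Int Int)
    (hinv : InvW a m i d) :
    d.contains (k - PySem.List.pyGetD a i 0) = winHit a m k i := by
  have hlo : (if i - m + 1 < 0 then 0 else i - m + 1) = max 0 (i - m + 1) := by omega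
  have hwin : winHit a m k i = true
      ↔ ∃ j ∈ PySem.List.pyRange (max 0 (i - m + 1)) i 1,
          PySem.List.pyGetD a j 0 = k - PySem.List.pyGetD a i 0 := by
    rw [winHit, hlo]
    simp [List.any_eq_true]
  have hmm : wc a (max 0 (i - m + 1)) i (k - PySem.List.pyGetD a i 0) ≠ 0
      ↔ ∃ j ∈ PySem.List.pyRange (max 0 (i - m + 1)) i 1,
          PySem.List.pyGetD a j 0 = k - PySem.List.pyGetD a i 0 := by
    rw [← wc_mem]
    simp [winVals, List.mem_map]
  rw [Bool.eq_iff_iff, PySem.Dict.contains_eq_isSome_get?, hinv]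
  split_ifs with hz
  · simp only [Option.isSome_none, Bool.false_eq_true, false_iff]
    intro hw
    exact (hmm.mpr (hwin.mp hw)) hz
  · simp only [Option.isSome_some, true_iff]
    exact hwin.mpr (hmm.mp hz)

theorem insert_step (a : List Int) (m : Int) (hm : 1 ≤ m) (i : Int) (h0 : 0 ≤ i)
    (d : PySem.Dict Int Int) (hinv : InvW a m i d) :
    InvA a m (i + 1)
      (d.insert (PySem.List.pyGetD a i 0) (d.getD (PySem.List.pyGetD a i 0) 0 + 1)) := by
  have hgetD := inv_getD a (max 0 (i - m + 1)) i d hinv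
  have hmax : max 0 (i + 1 - m) = max 0 (i - m + 1) := by omega
  have hlosr : max 0 (i - m + 1) ≤ i := by omega
  intro v
  rw [PySem.Dict.get?_insert, hmax, wc_snoc a (max 0 (i - m + 1)) i v hlosr]
  rcases eq_or_ne v (PySem.List.pyGetD a i 0) with hv | hv
  · subst hv
    rw [if_pos rfl, if_pos rfl, hgetD, if_neg (by omega)]
    push_cast
    ring_nf
  · have hz : (if PySem.List.pyGetD a i 0 = v then 1 else 0) = 0 :=
      if_neg (fun h => hv h.symm)
    rw [if_neg hv, hinv v, hz, Nat.add_zero]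

theorem stepA_step (a : List Int) (m k : Int) (hm : 1 ≤ m) (i : Int) (h0 : 0 ≤ i)
    (c : Int) (d : PySem.Dict Int Int) (hinv : InvA a m i d) :
    (stepA a m k (c, d) (i, PySem.List.pyGetD a i 0)).1 = (if winHit a m k i then c + 1 else c)
    ∧ InvA a m (i + 1) (stepA a m k (c, d) (i, PySem.List.pyGetD a i 0)).2 := by
  have hev := evict_step a m hm i h0 d hinv
  constructor
  · simp only [stepA]
    rw [contains_step a m k i h0 _ hev]
  · simp only [stepA]
    exact insert_step a m hm i h0 _ hev

theorem loopA (a : List Int) (m k : Int) (hm : 1 ≤ m) :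
    ∀ (l : Nat) (i : Int), 0 ≤ i → i + l = a.length →
    ∀ (c : Int) (d : PySem.Dict Int Int), InvA a m i d →
    ((PySem.List.pyRange i (a.length : Int) 1).foldl
        (fun st j => stepA a m k st (j, PySem.List.pyGetD a j 0)) (c, d)).1
      = (PySem.List.pyRange i (a.length : Int) 1).foldl
        (fun c i => if winHit a m k i then c + 1 else c) c := by
  intro l
  induction l with
  | zero =>
    intro i h0 hlen c d hinv
    rw [PySem.List.pyRange_one_eq_nil (by omega)]
    rfl
  | succ n ihn =>
    intro i h0 hlen c d hinv
    rw [PySem.List.pyRange_one_cons (by omega)]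
    simp only [List.foldl_cons]
    obtain ⟨h1, h2⟩ := stepA_step a m k hm i h0 c d hinv
    have hpair : stepA a m k (c, d) (i, PySem.List.pyGetD a i 0)
        = ((if winHit a m k i then c + 1 else c),
           (stepA a m k (c, d) (i, PySem.List.pyGetD a i 0)).2) := by
      rw [← h1]
    rw [hpair]
    exact ihn (i + 1) (by omega) (by omega) _ _ h2

theorem step0_step (a : List Int) (k i : Int) (h0 : 0 ≤ i) (c : Int)
    (d : PySem.Dict Int Int) (hinv : Inv0 a i d) :
    (stepA a 0 k (c, d) (i, PySem.List.pyGetD a i 0)).1 = (if cond0 a k i then c + 1 else c)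
    ∧ Inv0 a (i + 1) (stepA a 0 k (c, d) (i, PySem.List.pyGetD a i 0)).2 := by
  have hgd : d.getD (PySem.List.pyGetD a i 0) 0 ≤ 1 := by
    rw [PySem.Dict.getD_eq_get?_getD, hinv (PySem.List.pyGetD a i 0)]
    split <;> simp
  have hv_eq : (if i > 0 - 1 then
        (let x := PySem.List.pyGetD a (i - 0) 0
         if d.getD x 0 ≤ 1 then d.erase x else d.modify x 0 (fun t => t - 1))
      else d) = d.erase (PySem.List.pyGetD a i 0) := by
    rw [if_pos (by omega)]
    simp only [sub_zero]
    rw [if_pos hgd]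
  have herase : ∀ v, (d.erase (PySem.List.pyGetD a i 0)).get? v
      = if v ∈ winVals a 0 i ∧ v ≠ PySem.List.pyGetD a i 0 then some 1 else none := by
    intro v
    rw [dict_get?_erase, hinv v]
    rcases eq_or_ne v (PySem.List.pyGetD a i 0) with h | h
    · simp [h]
    · rw [if_neg h]
      by_cases hmem : v ∈ winVals a 0 i <;> simp [hmem, h]
  have hcont : (d.erase (PySem.List.pyGetD a i 0)).contains (k - PySem.List.pyGetD a i 0)
      = cond0 a k i := by
    rw [Bool.eq_iff_iff, PySem.Dict.contains_eq_isSome_get?, herase]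
    simp only [cond0, decide_eq_true_eq]
    split_ifs with h <;> simp [h]
  constructor
  · simp only [stepA]
    rw [hv_eq, hcont]
  · simp only [stepA]
    rw [hv_eq]
    have hgd0 : (d.erase (PySem.List.pyGetD a i 0)).getD (PySem.List.pyGetD a i 0) 0 = 0 := by
      rw [PySem.Dict.getD_eq_get?_getD, herase]
      simp
    intro v
    rw [PySem.Dict.get?_insert, winVals_snoc a 0 i h0]
    rcases eq_or_ne v (PySem.List.pyGetD a i 0) with hv | hv
    · rw [if_pos hv, hgd0, if_pos (by rw [hv]; exact List.mem_append_right _ (by simp))]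
      norm_num
    · rw [if_neg hv, herase v]
      by_cases hmem : v ∈ winVals a 0 i
      · rw [if_pos ⟨hmem, hv⟩, if_pos (List.mem_append_left _ hmem)]
      · rw [if_neg (fun h => hmem h.1), if_neg (by simp [hmem, hv])]

theorem loop0 (a : List Int) (k : Int) :
    ∀ (l : Nat) (i : Int), 0 ≤ i → i + l = a.length →
    ∀ (c : Int) (d : PySem.Dict Int Int), Inv0 a i d →
    ((PySem.List.pyRange i (a.length : Int) 1).foldl
        (fun st j => stepA a 0 k st (j, PySem.List.pyGetD a j 0)) (c, d)).1
      = c + ((PySem.List.pyRange i (a.length : Int) 1).countP (cond0 a k) : Int) := by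
  intro l
  induction l with
  | zero =>
    intro i h0 hlen c d hinv
    rw [PySem.List.pyRange_one_eq_nil (by omega)]
    simp
  | succ n ihn =>
    intro i h0 hlen c d hinv
    rw [PySem.List.pyRange_one_cons (by omega)]
    simp only [List.foldl_cons, List.countP_cons]
    obtain ⟨h1, h2⟩ := step0_step a k i h0 c d hinv
    have hpair : stepA a 0 k (c, d) (i, PySem.List.pyGetD a i 0)
        = ((if cond0 a k i then c + 1 else c),
           (stepA a 0 k (c, d) (i, PySem.List.pyGetD a i 0)).2) := by
      rw [← h1]
    rw [hpair, ihn (i + 1) (by omega) (by omega) _ _ h2]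
    by_cases hc : cond0 a k i = true
    · simp only [hc, if_pos]
      push_cast
      ring
    · rw [Bool.not_eq_true] at hc
      simp only [hc, Bool.false_eq_true, if_false]
      push_cast
      ring

-- A's fold, rewritten as a fold over the index range
theorem a_as_range (a : List Int) (m k : Int) :
    findPairsSummingToK a m k
      = ((PySem.List.pyRange 0 (a.length : Int) 1).foldl
          (fun st j => stepA a m k st (j, PySem.List.pyGetD a j 0)) (0, PySem.Dict.empty)).1 := by
  unfold findPairsSummingToK
  rw [PySem.List.enumerate_eq_map_pyRange a 0, List.foldl_map]
  simp [PySem.List.len]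

theorem alt_m0 (a : List Int) (k : Int) : findPairsSummingToK_alt a 0 k = 0 := by
  unfold findPairsSummingToK_alt
  rw [PySem.List.foldl_congr_mem (PySem.List.pyRange 0 ((a.length : Int)) 1) _
    (fun acc _ => acc) 0 ?_, PySem.List.foldl_ignore]
  intro acc x hx
  rw [PySem.List.mem_pyRange_one] at hx
  have hw : winHit a 0 k x = false := by
    rw [winHit, if_neg (by omega), PySem.List.pyRange_one_eq_nil (by omega)]
    rfl
  rw [hw]
  rfl

theorem a_m0 (a : List Int) (k : Int) :
    findPairsSummingToK a 0 k
      = ((PySem.List.pyRange 0 (a.length : Int) 1).countP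
          (cond0 a k) : Int) := by
  rw [a_as_range]
  have h0inv : Inv0 a 0 PySem.Dict.empty := by
    intro v
    rw [winVals_nil a 0 0 le_rfl]
    simp [PySem.Dict.get?_empty]
  have h := loop0 a k a.length 0 le_rfl (by omega) 0 PySem.Dict.empty h0inv
  simpa using h

-- D_ holds exactly when the m = 0 count is positive
theorem d_iff_pos (a : List Int) (k : Int) :
    (∃ i : Fin a.length, ∃ j : Fin a.length,
        (j : Nat) < (i : Nat) ∧ a[(j : Nat)] = k - a[(i : Nat)] ∧ k ≠ 2 * a[(i : Nat)])
      ↔ 0 < (PySem.List.pyRange 0 (a.length : Int) 1).countP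
          (cond0 a k) := by
  rw [List.countP_pos_iff]
  constructor
  · rintro ⟨i, j, hji, hval, hk⟩
    refine ⟨((i : Nat) : Int), PySem.List.mem_pyRange_one.mpr
      ⟨Int.natCast_nonneg _, by exact_mod_cast i.isLt⟩, ?_⟩
    have hgi : PySem.List.pyGetD a ((i : Nat) : Int) 0 = a[(i : Nat)] := by
      rw [PySem.List.pyGetD_eq_getElem a 0 (Int.natCast_nonneg _) (by exact_mod_cast i.isLt)]
      simp
    have hgj : PySem.List.pyGetD a ((j : Nat) : Int) 0 = a[(j : Nat)] := by
      rw [PySem.List.pyGetD_eq_getElem a 0 (Int.natCast_nonneg _) (by exact_mod_cast j.isLt)]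
      simp
    simp only [cond0, decide_eq_true_eq]
    refine ⟨?_, ?_⟩
    · rw [hgi]
      simp only [winVals, List.mem_map]
      exact ⟨((j : Nat) : Int), PySem.List.mem_pyRange_one.mpr
        ⟨Int.natCast_nonneg _, by exact_mod_cast hji⟩, by rw [hgj, hval]⟩
    · rw [hgi]
      omega
  · rintro ⟨ii, hmem, hcond⟩
    rw [PySem.List.mem_pyRange_one] at hmem
    simp only [cond0, decide_eq_true_eq] at hcond
    obtain ⟨hmm, hne⟩ := hcond
    simp only [winVals, List.mem_map] at hmm
    obtain ⟨jj, hjmem, hjval⟩ := hmm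
    rw [PySem.List.mem_pyRange_one] at hjmem
    have hilt : ii.toNat < a.length := by omega
    have hjlt : jj.toNat < a.length := by omega
    have h2 : PySem.List.pyGetD a ii 0 = a[ii.toNat] :=
      PySem.List.pyGetD_eq_getElem a 0 (by omega) (by omega)
    have h1 : PySem.List.pyGetD a jj 0 = a[jj.toNat] :=
      PySem.List.pyGetD_eq_getElem a 0 (by omega) (by omega)
    refine ⟨⟨ii.toNat, hilt⟩, ⟨jj.toNat, hjlt⟩, by simp; omega, ?_, ?_⟩
    · show a[jj.toNat] = k - a[ii.toNat]
      rw [← h1, hjval, h2]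
    · show k ≠ 2 * a[ii.toNat]
      rw [h2] at hne
      omega

-- ===== VERDICT (by name: the statement is the Claim_ definition above) =====
theorem findPairsSummingToK_spec : Claim_unchanged_findPairsSummingToK := by
  intro a m k _ hpre hnd
  rcases eq_or_ne a [] with hnil | hnil
  · subst hnil
    rfl
  · have hm : 0 ≤ m := hpre.resolve_right hnil
    rcases eq_or_lt_of_le hm with hm0 | hm1
    · cases hm0
      rw [a_m0, alt_m0]
      have hcnt : (PySem.List.pyRange 0 (a.length : Int) 1).countP (cond0 a k) = 0 := by
        by_contra hne
        exact hnd ⟨rfl, (d_iff_pos a k).mpr (Nat.pos_of_ne_zero hne)⟩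
      rw [hcnt]
      rfl
    · rw [a_as_range]
      unfold findPairsSummingToK_alt
      refine loopA a m k hm1 a.length 0 le_rfl (by omega) 0 PySem.Dict.empty ?_
      intro v
      have hz : wc a (max 0 (0 - m)) 0 v = 0 := by
        rw [wc, winVals_nil a _ 0 (by omega)]
        rfl
      rw [hz]
      simp [PySem.Dict.get?_empty]

theorem findPairsSummingToK_changed : Claim_changed_findPairsSummingToK := by
  unfold Claim_changed_findPairsSummingToK; decide

theorem findPairsSummingToK_tight : Claim_exact_findPairsSummingToK := by
  intro a m k _ _ hd
  obtain ⟨hm0, hex⟩ := hd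
  subst hm0
  rw [a_m0, alt_m0]
  have hpos := (d_iff_pos a k).mp hex
  intro hcontra
  omega
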